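-- pv_equiv track=rewrite | github.com/jclements3/trefoil | scripts/build_tchaikovsky_mei.py | l_units_to_mei_dur
-- ===== SOURCE A (Python) =====
-- def l_units_to_mei_dur(num, den, mel_l_num, mel_l_den):
--     """Convert (num/den) L-units at L:mel_l_num/mel_l_den to an MEI @dur string.
--
--     MEI dur values: 1=whole, 2=half, 4=quarter, 8=eighth, 16=16th, etc.
--     For dotted/non-standard durations, MEI supports @dots="1" etc.
--
--     Returns (dur_value, dots) where dur_value is an MEI dur string or None if fractional.
--     """
--     # Total duration in whole-notes:
--     # num / den units × (mel_l_num / mel_l_den) whole-notes per unit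
--     # = num * mel_l_num / (den * mel_l_den)
--     # MEI dur = 1 / (num * mel_l_num / (den * mel_l_den)) = den * mel_l_den / (num * mel_l_num)
--     from fractions import Fraction
--     whole_notes = Fraction(num * mel_l_num, den * mel_l_den)
--     # dur = 1/whole_notes
--     if whole_notes == 0:
--         return (None, 0)
--     dur_frac = Fraction(1, 1) / whole_notes
--     # Try standard dur values: 1, 2, 4, 8, 16, 32, 64 (with dots)
--     for base in [1, 2, 4, 8, 16, 32, 64, 128]:
--         if dur_frac == Fraction(base, 1):
--             return (str(base), 0)
--         # single dot: 1.5 × base_length → 2/3 of dur_frac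
--         # base.5 duration: note length = 1/base + 1/(2*base) = 3/(2*base)
--         # dur_frac = 2*base/3
--         if dur_frac == Fraction(2 * base, 3):
--             return (str(base), 1)
--         # double dot: 7/(4*base) duration → dur_frac = 4*base/7
--         if dur_frac == Fraction(4 * base, 7):
--             return (str(base), 2)
--     return (None, 0)
-- ===== SOURCE B (Python) =====
-- def l_units_to_mei_dur(num, den, mel_l_num, mel_l_den):
--     """Classify the reciprocal duration fraction by its reduced denominator
--     (1 -> plain, 3 -> single dot, 7 -> double dot) instead of scanning bases."""
--     from fractions import Fraction
--     whole_notes = Fraction(num * mel_l_num, den * mel_l_den)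
--     if whole_notes == 0:
--         return (None, 0)
--     dur = Fraction(1, 1) / whole_notes
--     p, q = dur.numerator, dur.denominator
--     std = (1, 2, 4, 8, 16, 32, 64, 128)
--     if q == 1:
--         return (str(p), 0) if p in std else (None, 0)
--     if q == 3 and p % 2 == 0 and p // 2 in std:
--         return (str(p // 2), 1)
--     if q == 7 and p % 4 == 0 and p // 4 in std:
--         return (str(p // 4), 2)
--     return (None, 0)
-- ===== Notes on version B (the rewrite author's own statement) =====
-- stated objective: simpler
-- what changed: Replaces the 8-base x 3-comparison scan over candidate durations with a direct classification of the reduced reciprocal fraction by its denominator (1/3/7 -> 0/1/2 dots) plus one power-of-two membership check.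
import Mathlib
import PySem

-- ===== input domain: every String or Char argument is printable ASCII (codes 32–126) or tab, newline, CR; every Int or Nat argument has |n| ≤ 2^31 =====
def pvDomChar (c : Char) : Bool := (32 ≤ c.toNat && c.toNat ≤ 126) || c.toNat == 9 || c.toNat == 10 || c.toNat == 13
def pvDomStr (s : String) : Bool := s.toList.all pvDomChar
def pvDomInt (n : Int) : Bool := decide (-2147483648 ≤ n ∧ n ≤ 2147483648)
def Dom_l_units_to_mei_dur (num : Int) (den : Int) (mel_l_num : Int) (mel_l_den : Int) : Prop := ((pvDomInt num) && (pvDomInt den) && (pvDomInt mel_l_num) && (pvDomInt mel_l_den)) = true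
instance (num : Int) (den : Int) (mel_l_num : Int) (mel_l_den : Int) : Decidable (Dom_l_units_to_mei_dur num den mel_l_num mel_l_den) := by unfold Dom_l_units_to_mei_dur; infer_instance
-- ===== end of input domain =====

-- B classifies the reduced reciprocal fraction by its denominator (1/3/7 → 0/1/2 dots)
-- instead of A's 8-base × 3-comparison scan; objective: simpler.

-- ===== PORT A =====
-- Python's Fraction(n, d) normalized form: reduced, denominator positive (d ≠ 0 assumed;
-- the divisions are exact, so Lean's `/` computes exactly Python's normalization).
def pvMkFrac (n d : Int) : Int × Int :=
  let g : Int := Int.gcd n d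
  if d < 0 then (-(n / g), -(d / g)) else (n / g, d / g)

-- A's for-loop over the candidate bases; `dur_frac == Fraction(c, d)` is ported as the exact
-- cross-multiplication `p * d = c * q` (exact Fraction equality for d ≠ 0).
def pvAScan (p q : Int) : List Int → Option String × Int
  | [] => (none, 0)
  | b :: rest =>
    if p * 1 = b * q then (some (PySem.Int.toStr b), 0)
    else if p * 3 = 2 * b * q then (some (PySem.Int.toStr b), 1)
    else if p * 7 = 4 * b * q then (some (PySem.Int.toStr b), 2)
    else pvAScan p q rest

def l_units_to_mei_dur (num : Int) (den : Int) (mel_l_num : Int) (mel_l_den : Int) : Option String × Int :=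
  let wn := pvMkFrac (num * mel_l_num) (den * mel_l_den)
  if wn.1 = 0 then (none, 0)
  else
    let dur := pvMkFrac (1 * wn.2) (1 * wn.1)   -- Fraction(1,1) / whole_notes
    pvAScan dur.1 dur.2 [1, 2, 4, 8, 16, 32, 64, 128]

-- ===== PORT B =====
def pvStd : List Int := [1, 2, 4, 8, 16, 32, 64, 128]

def pvClassify (p q : Int) : Option String × Int :=
  if q = 1 then (if p ∈ pvStd then (some (PySem.Int.toStr p), 0) else (none, 0))
  else if q = 3 ∧ PySem.Int.mod p 2 = 0 ∧ PySem.Int.floordiv p 2 ∈ pvStd then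
    (some (PySem.Int.toStr (PySem.Int.floordiv p 2)), 1)
  else if q = 7 ∧ PySem.Int.mod p 4 = 0 ∧ PySem.Int.floordiv p 4 ∈ pvStd then
    (some (PySem.Int.toStr (PySem.Int.floordiv p 4)), 2)
  else (none, 0)

def l_units_to_mei_dur_alt (num : Int) (den : Int) (mel_l_num : Int) (mel_l_den : Int) : Option String × Int :=
  let wn := pvMkFrac (num * mel_l_num) (den * mel_l_den)
  if wn.1 = 0 then (none, 0)
  else
    let dur := pvMkFrac (1 * wn.2) (1 * wn.1)   -- Fraction(1,1) / whole_notes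
    pvClassify dur.1 dur.2

-- ===== PRECONDITION & SPEC =====
-- Pre_ excludes exactly the inputs where Python's Fraction constructor raises ZeroDivisionError
-- (den * mel_l_den == 0); B raises there too.
def Pre_l_units_to_mei_dur (num : Int) (den : Int) (mel_l_num : Int) (mel_l_den : Int) : Prop :=
  den * mel_l_den ≠ 0
instance (num : Int) (den : Int) (mel_l_num : Int) (mel_l_den : Int) : Decidable (Pre_l_units_to_mei_dur num den mel_l_num mel_l_den) := by unfold Pre_l_units_to_mei_dur; infer_instance

def pvWitness_l_units_to_mei_dur : Int × Int × Int × Int := (1, 2, 1, 8)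

def Spec_l_units_to_mei_dur (num : Int) (den : Int) (mel_l_num : Int) (mel_l_den : Int) (out : Option String × Int) : Prop := out = l_units_to_mei_dur_alt num den mel_l_num mel_l_den
instance (num : Int) (den : Int) (mel_l_num : Int) (mel_l_den : Int) (out : Option String × Int) : Decidable (Spec_l_units_to_mei_dur num den mel_l_num mel_l_den out) := by unfold Spec_l_units_to_mei_dur; infer_instance

-- ===== CLAIM (what is proved, stated in full; the proofs are below) =====
def Claim_equal_l_units_to_mei_dur : Prop := ∀ (num : Int) (den : Int) (mel_l_num : Int) (mel_l_den : Int), Dom_l_units_to_mei_dur num den mel_l_num mel_l_den → Pre_l_units_to_mei_dur num den mel_l_num mel_l_den → Spec_l_units_to_mei_dur num den mel_l_num mel_l_den (l_units_to_mei_dur num den mel_l_num mel_l_den)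

-- ===== LEMMAS AND PROOFS =====

-- pvMkFrac with a nonzero denominator yields a positive denominator and a reduced pair.
lemma pvMkFrac_spec (n d : Int) (hd : d ≠ 0) :
    0 < (pvMkFrac n d).2 ∧ Int.gcd (pvMkFrac n d).1 (pvMkFrac n d).2 = 1 := by
  unfold pvMkFrac
  have hgnat : 0 < Int.gcd n d := Int.gcd_pos_iff.mpr (Or.inr hd)
  have hg : (0 : Int) < (Int.gcd n d : Int) := by exact_mod_cast hgnat
  have hgd : ((Int.gcd n d : Int)) ∣ d := Int.gcd_dvd_right n d
  have hcan : d / (Int.gcd n d : Int) * (Int.gcd n d : Int) = d := Int.ediv_mul_cancel hgd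
  have hred : Int.gcd (n / (Int.gcd n d : Int)) (d / (Int.gcd n d : Int)) = 1 :=
    Int.gcd_div_gcd_div_gcd hgnat
  by_cases hneg : d < 0
  · simp only [if_pos hneg]
    constructor
    · have : d / (Int.gcd n d : Int) < 0 := by nlinarith
      omega
    · simpa using hred
  · simp only [if_neg hneg]
    have hdpos : 0 < d := by omega
    constructor
    · have : 0 < d / (Int.gcd n d : Int) := by nlinarith [hcan]
      omega
    · exact hred

-- if none of A's three conditions holds for any base, the scan returns (None, 0)
lemma pvAScan_eq_none (p q : Int) (L : List Int)
    (h : ∀ b ∈ L, ¬(p * 1 = b * q) ∧ ¬(p * 3 = 2 * b * q) ∧ ¬(p * 7 = 4 * b * q)) :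
    pvAScan p q L = (none, 0) := by
  induction L with
  | nil => rfl
  | cons b rest ih =>
    obtain ⟨h1, h2, h3⟩ := h b (List.mem_cons_self ..)
    simp only [pvAScan, if_neg h1, if_neg h2, if_neg h3]
    exact ih (fun b' hb' => h b' (List.mem_cons_of_mem _ hb'))

-- from the cross-multiplied equality and coprimality, q divides the concrete denominator
lemma pv_q_dvd (p q c d : Int) (hcop : Int.gcd p q = 1) (h : p * d = c * q) : q ∣ d := by
  have h1 : q ∣ d * p := ⟨c, by linear_combination h⟩
  exact Int.dvd_of_dvd_mul_left_of_gcd_one h1 (by rw [Int.gcd_comm]; exact hcop)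

-- the heart of the equivalence: on a reduced fraction p/q (q > 0), A's scan and B's
-- denominator classification agree
lemma pvClassify_eq (p q : Int) (hq : 0 < q) (hcop : Int.gcd p q = 1) :
    pvAScan p q [1, 2, 4, 8, 16, 32, 64, 128] = pvClassify p q := by
  by_cases hq1 : q = 1
  · subst hq1
    by_cases e1 : p = 1; · subst e1; decide
    by_cases e2 : p = 2; · subst e2; decide
    by_cases e3 : p = 4; · subst e3; decide
    by_cases e4 : p = 8; · subst e4; decide
    by_cases e5 : p = 16; · subst e5; decide
    by_cases e6 : p = 32; · subst e6; decide
    by_cases e7 : p = 64; · subst e7; decide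
    by_cases e8 : p = 128; · subst e8; decide
    have hA : pvAScan p 1 [1, 2, 4, 8, 16, 32, 64, 128] = (none, 0) := by
      apply pvAScan_eq_none
      intro b hb; fin_cases hb <;> exact ⟨by omega, by omega, by omega⟩
    have hmem : ¬ p ∈ pvStd := by simp [pvStd]; omega
    rw [hA]; unfold pvClassify; rw [if_pos rfl, if_neg hmem]
  by_cases hq3 : q = 3
  · subst hq3
    have hnd : ¬ (3 : Int) ∣ p := by
      intro hdd
      have hu := (Int.isCoprime_iff_gcd_eq_one.mpr hcop).isUnit_of_dvd' hdd (dvd_refl 3)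
      rw [Int.isUnit_iff] at hu; omega
    by_cases e1 : p = 2; · subst e1; decide
    by_cases e2 : p = 4; · subst e2; decide
    by_cases e3 : p = 8; · subst e3; decide
    by_cases e4 : p = 16; · subst e4; decide
    by_cases e5 : p = 32; · subst e5; decide
    by_cases e6 : p = 64; · subst e6; decide
    by_cases e7 : p = 128; · subst e7; decide
    by_cases e8 : p = 256; · subst e8; decide
    have hA : pvAScan p 3 [1, 2, 4, 8, 16, 32, 64, 128] = (none, 0) := by
      apply pvAScan_eq_none
      intro b hb; fin_cases hb <;> exact ⟨by omega, by omega, by omega⟩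
    rw [hA]; unfold pvClassify
    simp only [pysem]
    simp
    intro h2 hdv
    simp [pvStd] at hdv
    omega
  by_cases hq7 : q = 7
  · subst hq7
    have hnd : ¬ (7 : Int) ∣ p := by
      intro hdd
      have hu := (Int.isCoprime_iff_gcd_eq_one.mpr hcop).isUnit_of_dvd' hdd (dvd_refl 7)
      rw [Int.isUnit_iff] at hu; omega
    by_cases e1 : p = 4; · subst e1; decide
    by_cases e2 : p = 8; · subst e2; decide
    by_cases e3 : p = 16; · subst e3; decide
    by_cases e4 : p = 32; · subst e4; decide
    by_cases e5 : p = 64; · subst e5; decide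
    by_cases e6 : p = 128; · subst e6; decide
    by_cases e7 : p = 256; · subst e7; decide
    by_cases e8 : p = 512; · subst e8; decide
    have hA : pvAScan p 7 [1, 2, 4, 8, 16, 32, 64, 128] = (none, 0) := by
      apply pvAScan_eq_none
      intro b hb; fin_cases hb <;> exact ⟨by omega, by omega, by omega⟩
    rw [hA]; unfold pvClassify
    simp only [pysem]
    simp
    intro h4 hdv
    simp [pvStd] at hdv
    omega
  -- q ∉ {1, 3, 7}: every condition of A's scan is impossible on a reduced fraction
  have hA : pvAScan p q [1, 2, 4, 8, 16, 32, 64, 128] = (none, 0) := by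
    apply pvAScan_eq_none
    intro b _
    refine ⟨?_, ?_, ?_⟩
    · intro hcond
      have hdv := pv_q_dvd p q b 1 hcop hcond
      have := Int.le_of_dvd (by norm_num) hdv
      omega
    · intro hcond
      have hdv := pv_q_dvd p q (2 * b) 3 hcop hcond
      have := Int.le_of_dvd (by norm_num) hdv
      interval_cases q <;> omega
    · intro hcond
      have hdv := pv_q_dvd p q (4 * b) 7 hcop hcond
      have := Int.le_of_dvd (by norm_num) hdv
      interval_cases q <;> omega
  rw [hA]; unfold pvClassify
  rw [if_neg hq1, if_neg (by simp [hq3]), if_neg (by simp [hq7])]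

-- ===== VERDICT (by name: the statement is the Claim_ definition above) =====
theorem l_units_to_mei_dur_spec : Claim_equal_l_units_to_mei_dur := by
  intro num den mel_l_num mel_l_den _ _
  unfold Spec_l_units_to_mei_dur l_units_to_mei_dur l_units_to_mei_dur_alt
  by_cases h0 : (pvMkFrac (num * mel_l_num) (den * mel_l_den)).1 = 0
  · simp [h0]
  · simp only [if_neg h0]
    have hd := pvMkFrac_spec (1 * (pvMkFrac (num * mel_l_num) (den * mel_l_den)).2)
      (1 * (pvMkFrac (num * mel_l_num) (den * mel_l_den)).1) (by simpa using h0)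
    exact pvClassify_eq _ _ hd.1 hd.2
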